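-- pv_equiv track=rewrite | github.com/Middleware-NoSQL/Traductor-SQL-NOSQL | Backend/app/parser/advanced_parser.py | _determine_subquery_context
-- ===== SOURCE A (Python) =====
-- def _determine_subquery_context(query, start_pos, end_pos):
--     """
--     Determina el contexto de una subquery (WHERE, FROM, SELECT, etc.).
--
--     Args:
--         query (str): Consulta completa
--         start_pos (int): Posición de inicio de la subquery
--         end_pos (int): Posición de fin de la subquery
--
--     Returns:
--         str: Contexto de la subquery
--     """
--     # Buscar hacia atrás para encontrar el contexto
--     prefix = query[:start_pos].upper()
--
--     # Buscar las últimas palabras clave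
--     keywords = ['WHERE', 'FROM', 'SELECT', 'IN', 'EXISTS', 'ANY', 'ALL']
--
--     for keyword in keywords:
--         last_pos = prefix.rfind(keyword)
--         if last_pos != -1:
--             # Verificar que no hay otra palabra clave más reciente
--             is_most_recent = True
--             for other_keyword in keywords:
--                 if other_keyword != keyword:
--                     other_pos = prefix.rfind(other_keyword)
--                     if other_pos > last_pos:
--                         is_most_recent = False
--                         break
--
--             if is_most_recent:
--                 return keyword.lower()
--
--     return "unknown"
-- ===== SOURCE B (Python) =====
-- KEYWORDS = ['WHERE', 'FROM', 'SELECT', 'IN', 'EXISTS', 'ANY', 'ALL']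
--
--
-- def _determine_subquery_context(query, start_pos, end_pos):
--     prefix = query[:start_pos].upper()
--     best_pos = -1
--     best_kw = ''
--     for kw in KEYWORDS:
--         pos = prefix.rfind(kw)
--         if pos > best_pos:
--             best_pos = pos
--             best_kw = kw
--     return best_kw.lower() if best_pos != -1 else 'unknown'
-- ===== Notes on version B (the rewrite author's own statement) =====
-- stated objective: simpler
-- what changed: Replaces A's nested most-recent check (re-running rfind for every other keyword at each candidate) by a single argmax pass: one rfind per keyword, keeping the best position with a strict '>' so the first keyword in list order wins ties.
import Mathlib
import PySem

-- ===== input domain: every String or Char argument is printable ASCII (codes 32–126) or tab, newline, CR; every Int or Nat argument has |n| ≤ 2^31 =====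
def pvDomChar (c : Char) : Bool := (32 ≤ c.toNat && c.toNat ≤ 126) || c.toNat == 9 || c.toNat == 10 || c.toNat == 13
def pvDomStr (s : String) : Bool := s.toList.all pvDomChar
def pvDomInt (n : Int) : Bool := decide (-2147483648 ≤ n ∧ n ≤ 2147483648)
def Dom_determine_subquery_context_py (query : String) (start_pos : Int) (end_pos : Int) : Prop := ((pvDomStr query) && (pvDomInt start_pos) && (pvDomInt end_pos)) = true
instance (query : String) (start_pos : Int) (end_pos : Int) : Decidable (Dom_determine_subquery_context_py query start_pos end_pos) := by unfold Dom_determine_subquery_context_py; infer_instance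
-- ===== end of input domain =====

-- B replaces A's nested "is there a more recent keyword?" rescan by a single argmax pass
-- over one rfind per keyword (objective: simpler).

def pvKeywords : List String := ["WHERE", "FROM", "SELECT", "IN", "EXISTS", "ANY", "ALL"]

-- ===== PORT A =====
-- inner for-loop with break: short-circuit conjunction over the keyword list
def pvIsMostRecent (pre kw : String) (lastPos : Int) : Bool :=
  pvKeywords.all (fun ok => ok == kw || !(decide (PySem.Str.rfind pre ok > lastPos)))

def pvALoop (pre : String) : List String → String
  | [] => "unknown"
  | kw :: rest =>
    let lastPos := PySem.Str.rfind pre kw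
    if lastPos ≠ -1 then
      if pvIsMostRecent pre kw lastPos then PySem.Str.lower kw
      else pvALoop pre rest
    else pvALoop pre rest

def determine_subquery_context_py (query : String) (start_pos : Int) (end_pos : Int) : String :=
  let pre := PySem.Str.upper (PySem.Str.slice query none (some start_pos))
  pvALoop pre pvKeywords

-- ===== PORT B =====
def pvBStep (pre : String) (acc : Int × String) (kw : String) : Int × String :=
  let pos := PySem.Str.rfind pre kw
  if pos > acc.1 then (pos, kw) else acc

def determine_subquery_context_py_alt (query : String) (start_pos : Int) (end_pos : Int) : String :=
  let pre := PySem.Str.upper (PySem.Str.slice query none (some start_pos))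
  let best := pvKeywords.foldl (pvBStep pre) (-1, "")
  if best.1 ≠ -1 then PySem.Str.lower best.2 else "unknown"

-- ===== PRECONDITION & SPEC =====
def Spec_determine_subquery_context_py (query : String) (start_pos : Int) (end_pos : Int) (out : String) : Prop := out = determine_subquery_context_py_alt query start_pos end_pos
instance (query : String) (start_pos : Int) (end_pos : Int) (out : String) : Decidable (Spec_determine_subquery_context_py query start_pos end_pos out) := by unfold Spec_determine_subquery_context_py; infer_instance

-- ===== CLAIM (what is proved, stated in full; the proofs are below) =====
def Claim_equal_determine_subquery_context_py : Prop := ∀ (query : String) (start_pos : Int) (end_pos : Int), Dom_determine_subquery_context_py query start_pos end_pos → Spec_determine_subquery_context_py query start_pos end_pos (determine_subquery_context_py query start_pos end_pos)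

-- ===== LEMMAS AND PROOFS =====

-- rfind never returns less than -1
theorem pvRfindGo_ge (s sub : List Char) : ∀ n : Nat, -1 ≤ PySem.Chars.rfind.go s sub n := by
  intro n
  induction n with
  | zero => simp [PySem.Chars.rfind.go]; split <;> omega
  | succ j ih =>
    simp [PySem.Chars.rfind.go]
    split
    · omega
    · exact ih

theorem pvRfind_ge (s sub : String) : -1 ≤ PySem.Str.rfind s sub := by
  simp only [PySem.Str.rfind_eq, PySem.Chars.rfind]
  exact pvRfindGo_ge _ _ _

-- find? only looks at the predicate's values on the members
theorem pvFind?_congr {α : Type} {p q : α → Bool} (l : List α)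
    (h : ∀ a ∈ l, p a = q a) : l.find? p = l.find? q := by
  induction l with
  | nil => rfl
  | cons a l ih =>
    simp only [List.find?]
    rw [h a (List.mem_cons_self)]
    cases q a with
    | true => rfl
    | false => exact ih (fun b hb => h b (List.mem_cons_of_mem a hb))

-- the predicate both searches reduce to: maximal among ks and strictly above bp
def pvPred (pre : String) (ks : List String) (bp : Int) (k : String) : Bool :=
  decide (bp < PySem.Str.rfind pre k) &&
    ks.all (fun k' => decide (PySem.Str.rfind pre k' ≤ PySem.Str.rfind pre k))

-- B's fold computes the first element maximal among ks with value above bp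
theorem pvB_char (pre : String) : ∀ (ks : List String) (bp : Int) (bk : String),
    ks.foldl (pvBStep pre) (bp, bk) =
      match ks.find? (pvPred pre ks bp) with
      | some k => (PySem.Str.rfind pre k, k)
      | none => (bp, bk) := by
  intro ks
  induction ks with
  | nil => intro bp bk; rfl
  | cons k rest ih =>
    intro bp bk
    simp only [List.foldl_cons, List.find?]
    by_cases hk : bp < PySem.Str.rfind pre k
    · have hstep : pvBStep pre (bp, bk) k = (PySem.Str.rfind pre k, k) := by
        simp only [pvBStep, if_pos hk]
      by_cases hmax : ∀ k' ∈ rest, PySem.Str.rfind pre k' ≤ PySem.Str.rfind pre k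
      · have hp : pvPred pre (k :: rest) bp k = true := by
          simp only [pvPred, Bool.and_eq_true, decide_eq_true_eq, List.all_eq_true,
            List.mem_cons]
          refine ⟨hk, ?_⟩
          rintro k' (rfl | h)
          · exact le_refl _
          · exact hmax k' h
        rw [hp, hstep, ih]
        have hnone : rest.find? (pvPred pre rest (PySem.Str.rfind pre k)) = none := by
          rw [List.find?_eq_none]
          intro k' hk'
          simp only [pvPred, Bool.and_eq_true, decide_eq_true_eq, not_and]
          intro hlt
          exact absurd hlt (not_lt.mpr (hmax k' hk'))
        rw [hnone]
      · push_neg at hmax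
        obtain ⟨w, hw, hwgt⟩ := hmax
        have hp : pvPred pre (k :: rest) bp k = false := by
          rw [Bool.eq_false_iff]
          simp only [ne_eq, pvPred, Bool.and_eq_true, decide_eq_true_eq, List.all_eq_true,
            List.mem_cons, not_and]
          intro _ hall
          exact absurd (hall w (Or.inr hw)) (not_le.mpr hwgt)
        rw [hp, hstep, ih]
        have hcongr : rest.find? (pvPred pre rest (PySem.Str.rfind pre k)) =
            rest.find? (pvPred pre (k :: rest) bp) := by
          apply pvFind?_congr
          intro a ha
          rw [Bool.eq_iff_iff]
          simp only [pvPred, Bool.and_eq_true, decide_eq_true_eq, List.all_eq_true,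
            List.mem_cons]
          constructor
          · rintro ⟨h1, h2⟩
            refine ⟨lt_trans hk h1, ?_⟩
            rintro k' (rfl | h)
            · exact le_of_lt h1
            · exact h2 k' h
          · rintro ⟨h1, h2⟩
            have hwa := h2 w (Or.inr hw)
            exact ⟨lt_of_lt_of_le hwgt hwa, fun k' h => h2 k' (Or.inr h)⟩
        rw [hcongr]
        have hsome : (rest.find? (pvPred pre (k :: rest) bp)).isSome := by
          rw [List.find?_isSome]
          cases hm : rest.argmax (PySem.Str.rfind pre) with
          | none => exact absurd (List.argmax_eq_none.mp hm ▸ hw) (List.not_mem_nil)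
          | some m =>
            refine ⟨m, List.argmax_mem hm, ?_⟩
            have hwm := List.le_of_mem_argmax hw hm
            simp only [pvPred, Bool.and_eq_true, decide_eq_true_eq, List.all_eq_true,
              List.mem_cons]
            refine ⟨by omega, ?_⟩
            rintro k' (rfl | h)
            · omega
            · exact List.le_of_mem_argmax h hm
        obtain ⟨a, ha⟩ := Option.isSome_iff_exists.mp hsome
        rw [ha]
    · have hstep : pvBStep pre (bp, bk) k = (bp, bk) := by
        simp only [pvBStep, if_neg hk]
      have hp : pvPred pre (k :: rest) bp k = false := by
        rw [Bool.eq_false_iff]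
        simp only [ne_eq, pvPred, Bool.and_eq_true, decide_eq_true_eq, not_and]
        intro h _
        exact hk h
      rw [hp, hstep, ih]
      have hcongr : rest.find? (pvPred pre rest bp) =
          rest.find? (pvPred pre (k :: rest) bp) := by
        apply pvFind?_congr
        intro a ha
        rw [Bool.eq_iff_iff]
        simp only [pvPred, Bool.and_eq_true, decide_eq_true_eq, List.all_eq_true,
          List.mem_cons]
        push_neg at hk
        constructor
        · rintro ⟨h1, h2⟩
          refine ⟨h1, ?_⟩
          rintro k' (rfl | h)
          · exact le_trans hk (le_of_lt h1)
          · exact h2 k' h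
        · rintro ⟨h1, h2⟩
          exact ⟨h1, fun k' h => h2 k' (Or.inr h)⟩
      rw [hcongr]

-- A's loop finds the first keyword passing its guard-and-rescan test
theorem pvA_char (pre : String) : ∀ (cur : List String),
    pvALoop pre cur =
      match cur.find? (fun k => decide (PySem.Str.rfind pre k ≠ -1) &&
          pvIsMostRecent pre k (PySem.Str.rfind pre k)) with
      | some k => PySem.Str.lower k
      | none => "unknown" := by
  intro cur
  induction cur with
  | nil => rfl
  | cons k rest ih =>
    simp only [pvALoop, List.find?]
    by_cases h1 : PySem.Str.rfind pre k ≠ -1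
    · rw [if_pos h1, decide_eq_true h1, Bool.true_and]
      cases h2 : pvIsMostRecent pre k (PySem.Str.rfind pre k) with
      | true => rfl
      | false => exact ih
    · rw [if_neg h1, decide_eq_false h1, Bool.false_and, ih]

-- A's member test equals B's, pointwise
theorem pvPred_eq (pre k : String) :
    (decide (PySem.Str.rfind pre k ≠ -1) && pvIsMostRecent pre k (PySem.Str.rfind pre k)) =
      pvPred pre pvKeywords (-1) k := by
  have hge := pvRfind_ge pre k
  rw [Bool.eq_iff_iff]
  simp only [pvIsMostRecent, pvPred, Bool.and_eq_true, decide_eq_true_eq, List.all_eq_true,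
    Bool.or_eq_true, beq_iff_eq, Bool.not_eq_true', decide_eq_false_iff_not, not_lt]
  constructor
  · rintro ⟨h1, h2⟩
    refine ⟨by omega, ?_⟩
    intro k' hk'
    rcases h2 k' hk' with rfl | h
    · exact le_refl _
    · exact h
  · rintro ⟨h1, h2⟩
    exact ⟨by omega, fun k' hk' => Or.inr (h2 k' hk')⟩

-- ===== VERDICT (by name: the statement is the Claim_ definition above) =====
theorem determine_subquery_context_py_spec : Claim_equal_determine_subquery_context_py := by
  intro query start_pos end_pos _
  unfold Spec_determine_subquery_context_py
  simp only [determine_subquery_context_py, determine_subquery_context_py_alt]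
  generalize PySem.Str.upper (PySem.Str.slice query none (some start_pos)) = pre
  rw [pvA_char, pvB_char]
  rw [pvFind?_congr
    (p := fun k => decide (PySem.Str.rfind pre k ≠ -1) && pvIsMostRecent pre k (PySem.Str.rfind pre k))
    (q := pvPred pre pvKeywords (-1)) pvKeywords (fun a _ => pvPred_eq pre a)]
  cases hf : pvKeywords.find? (pvPred pre pvKeywords (-1)) with
  | none => rfl
  | some k =>
    have hp := List.find?_some hf
    simp only [pvPred, Bool.and_eq_true, decide_eq_true_eq] at hp
    have hne : PySem.Str.rfind pre k ≠ -1 := by omega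
    show PySem.Str.lower k = if PySem.Str.rfind pre k ≠ -1 then PySem.Str.lower k else "unknown"
    rw [if_pos hne]
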